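-- pv_equiv track=rewrite | github.com/D2R-Reimagined/d2r-reimagined-mod | scripts/armor_txt_convert.py | get_active_columns
-- ===== SOURCE A (Python) =====
-- type_display_map = {
--     "helm": "Helm",
--     "circ": "Circlet",
--     "tors": "Chest Armor",
--     "shie": "Shield",
--     "ashd": "Pal Shield",
--     "head": "Nec Shield",
--     "glov": "Gloves",
--     "boot": "Boots",
--     "belt": "Belt",
--     "pelt": "Dru Helm",
--     "phlm": "Bar Helm"
-- }
--
-- fields = [
--     "name", "type",
--     ("mindam", "maxdam"),
--     ("minac", "maxac"),
--     "reqstr", "reqdex", "block", "durability", "levelreq", "gemsockets"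
-- ]
--
-- def merge_fields(row, pair):
--     a, b = pair
--     av = row.get(a, "")
--     bv = row.get(b, "")
--     if (not av or av.strip() == "0") and (not bv or bv.strip() == "0"):
--         return ""
--     if not av or av.strip() == "0":
--         return bv if bv and bv.strip() != "0" else ""
--     if not bv or bv.strip() == "0":
--         return av if av and av.strip() != "0" else ""
--     return f"{av}-{bv}"
--
-- def get_type_display(type_code):
--     return type_display_map.get(type_code, type_code)
--
-- def blank_if_zero(val):
--     return "" if not val or val.strip() == "0" else val
--
-- def get_active_columns(data):
--     # Scan all rows and find which columns are not empty for this data set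
--     active = []
--     for idx, field in enumerate(fields):
--         found = False
--         for row in data:
--             if isinstance(field, tuple):
--                 val = merge_fields(row, field)
--             elif field == "type":
--                 val = get_type_display(row.get("type", ""))
--             else:
--                 val = blank_if_zero(row.get(field, ""))
--             if val != "":
--                 found = True
--                 break
--         if found:
--             active.append(idx)
--     return active
-- ===== SOURCE B (Python) =====
-- fields = [
--     "name", "type",
--     ("mindam", "maxdam"),
--     ("minac", "maxac"),
--     "reqstr", "reqdex", "block", "durability", "levelreq", "gemsockets"
-- ]
--
-- def _nonblank(v):
--     # the displayed value is non-empty exactly when v is non-empty and not a bare "0"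
--     return bool(v) and v.strip() != "0"
--
-- def _row_hits(row, field):
--     # whether this row would render a non-empty cell for this field:
--     # a merged pair is non-empty iff either half is non-blank; the type display
--     # is non-empty iff the raw type code is (the map has no empty key/values);
--     # any other field is non-empty iff its raw value is non-blank.
--     if isinstance(field, tuple):
--         return _nonblank(row.get(field[0], "")) or _nonblank(row.get(field[1], ""))
--     if field == "type":
--         return row.get("type", "") != ""
--     return _nonblank(row.get(field, ""))
--
-- def get_active_columns(data):
--     # Row-outer scan with a pending set of field indices: an index moves to
--     # active on its first hit; stop early once nothing is pending.
--     pending = list(range(len(fields)))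
--     active = []
--     for row in data:
--         if not pending:
--             break
--         still = []
--         for idx in pending:
--             if _row_hits(row, fields[idx]):
--                 active.append(idx)
--             else:
--                 still.append(idx)
--         pending = still
--     return sorted(active)
-- ===== Notes on version B (the rewrite author's own statement) =====
-- stated objective: alternative
-- what changed: A scans column-by-column, rendering each cell's display string and restarting over the rows for every field; B makes a single row-outer pass over a pending set of field indices, decides activity with a boolean non-blank predicate instead of building display strings, drops an index on its first hit, stops once nothing is pending, and sorts the collected indices.
import Mathlib
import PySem

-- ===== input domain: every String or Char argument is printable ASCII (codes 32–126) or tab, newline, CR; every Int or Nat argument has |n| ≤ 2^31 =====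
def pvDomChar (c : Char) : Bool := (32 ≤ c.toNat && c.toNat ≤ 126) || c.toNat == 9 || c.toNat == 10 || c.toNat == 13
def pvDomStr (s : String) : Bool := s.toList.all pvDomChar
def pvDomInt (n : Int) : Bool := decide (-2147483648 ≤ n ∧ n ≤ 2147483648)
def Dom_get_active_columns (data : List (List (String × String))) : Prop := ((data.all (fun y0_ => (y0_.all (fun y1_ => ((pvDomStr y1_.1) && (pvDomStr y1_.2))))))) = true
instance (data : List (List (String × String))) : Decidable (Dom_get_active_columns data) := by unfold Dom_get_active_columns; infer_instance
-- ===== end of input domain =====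

-- B walks the rows once keeping a pending-index set and decides activity with a boolean non-blank predicate instead of rendering display strings; objective: alternative decomposition, same exact result.

-- ===== PORT A =====
def pvTypeDisplayMap : PySem.Dict String String :=
  PySem.Dict.mk [("helm","Helm"),("circ","Circlet"),("tors","Chest Armor"),("shie","Shield"),
    ("ashd","Pal Shield"),("head","Nec Shield"),("glov","Gloves"),("boot","Boots"),
    ("belt","Belt"),("pelt","Dru Helm"),("phlm","Bar Helm")]

-- fields: a string field or a (min,max) pair (Python tuple)
def pvFieldsList : List (Sum String (String × String)) :=
  [.inl "name", .inl "type", .inr ("mindam","maxdam"), .inr ("minac","maxac"),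
   .inl "reqstr", .inl "reqdex", .inl "block", .inl "durability", .inl "levelreq", .inl "gemsockets"]

def merge_fields (row : List (String × String)) (pair : String × String) : String :=
  let av := (PySem.Dict.mk row).getD pair.1 ""
  let bv := (PySem.Dict.mk row).getD pair.2 ""
  if (av = "" ∨ PySem.Str.strip av = "0") ∧ (bv = "" ∨ PySem.Str.strip bv = "0") then ""
  else if av = "" ∨ PySem.Str.strip av = "0" then
    (if bv ≠ "" ∧ PySem.Str.strip bv ≠ "0" then bv else "")
  else if bv = "" ∨ PySem.Str.strip bv = "0" then
    (if av ≠ "" ∧ PySem.Str.strip av ≠ "0" then av else "")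
  else av ++ "-" ++ bv

def get_type_display (type_code : String) : String :=
  pvTypeDisplayMap.getD type_code type_code

def blank_if_zero (val : String) : String :=
  if val = "" ∨ PySem.Str.strip val = "0" then "" else val

-- the if/elif/else chain of A's inner loop body
def pvVal (row : List (String × String)) (field : Sum String (String × String)) : String :=
  match field with
  | .inr p => merge_fields row p
  | .inl f => if f = "type" then get_type_display ((PySem.Dict.mk row).getD "type" "")
              else blank_if_zero ((PySem.Dict.mk row).getD f "")

-- A's inner row loop with its break: found
def pvFoundA (field : Sum String (String × String)) : List (List (String × String)) → Bool
  | [] => false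
  | r :: rs => if pvVal r field ≠ "" then true else pvFoundA field rs

def get_active_columns (data : List (List (String × String))) : List Int :=
  (PySem.List.enumerate pvFieldsList).foldl
    (fun active p => if pvFoundA p.2 data then active ++ [p.1] else active) []

-- ===== PORT B =====
-- _nonblank: truthy and not a bare "0" after strip
def pvNonblank (v : String) : Bool := v ≠ "" && PySem.Str.strip v ≠ "0"

-- _row_hits: would this row render a non-empty cell for this field?
def pvRowHits (row : List (String × String)) (field : Sum String (String × String)) : Bool :=
  match field with
  | .inr p => pvNonblank ((PySem.Dict.mk row).getD p.1 "") || pvNonblank ((PySem.Dict.mk row).getD p.2 "")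
  | .inl f => if f = "type" then ((PySem.Dict.mk row).getD "type" "") ≠ ""
              else pvNonblank ((PySem.Dict.mk row).getD f "")

-- one row of B: split pending into newly-active (appended to active) and still-pending
def pvRowScan (row : List (String × String)) (pending : List Nat) (active : List Int) :
    List Int × List Nat :=
  pending.foldl
    (fun acc idx =>
      if pvRowHits row (pvFieldsList.getD idx (.inl "")) then (acc.1 ++ [(idx : Int)], acc.2)
      else (acc.1, acc.2 ++ [idx]))
    (active, [])

def pvBLoop : List (List (String × String)) → List Nat → List Int → List Int
  | [], _, active => PySem.List.sorted active (fun x => x)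
  | r :: rs, pending, active =>
      if pending = [] then PySem.List.sorted active (fun x => x)
      else
        let pr := pvRowScan r pending active
        pvBLoop rs pr.2 pr.1

def get_active_columns_alt (data : List (List (String × String))) : List Int :=
  pvBLoop data (List.range pvFieldsList.length) []

-- ===== PRECONDITION & SPEC =====
def Spec_get_active_columns (data : List (List (String × String))) (out : List Int) : Prop := out = get_active_columns_alt data
instance (data : List (List (String × String))) (out : List Int) : Decidable (Spec_get_active_columns data out) := by unfold Spec_get_active_columns; infer_instance

-- ===== CLAIM =====
def Claim_equal_get_active_columns : Prop := ∀ (data : List (List (String × String))), Dom_get_active_columns data → Spec_get_active_columns data (get_active_columns data)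

-- ===== LEMMAS AND PROOFS =====

def pvHitRow (r : List (String × String)) (i : Nat) : Bool :=
  pvRowHits r (pvFieldsList.getD i (.inl ""))

lemma merge_ne (row : List (String × String)) (p : String × String) :
    decide (merge_fields row p ≠ "")
      = (pvNonblank ((PySem.Dict.mk row).getD p.1 "")
          || pvNonblank ((PySem.Dict.mk row).getD p.2 "")) := by
  unfold merge_fields pvNonblank
  dsimp only
  set av := (PySem.Dict.mk row).getD p.1 ""
  set bv := (PySem.Dict.mk row).getD p.2 ""
  split_ifs with h1 h2 h3 h4 h5 <;>
    simp_all [not_or] <;> tauto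

lemma gtd_ne (v : String) (h : ¬ v = "") : ¬ get_type_display v = "" := by
  unfold get_type_display
  rw [PySem.Dict.getD_eq_get?_getD]
  cases hg : pvTypeDisplayMap.get? v with
  | none => simpa using h
  | some w =>
      have hm := PySem.Dict.mem_items_of_get?_eq_some _ hg
      simp only [pvTypeDisplayMap, List.mem_cons, List.not_mem_nil,
        or_false, Prod.mk.injEq] at hm
      rcases hm with ⟨-, rfl⟩|⟨-, rfl⟩|⟨-, rfl⟩|⟨-, rfl⟩|⟨-, rfl⟩|⟨-, rfl⟩|⟨-, rfl⟩|⟨-, rfl⟩|⟨-, rfl⟩|⟨-, rfl⟩|⟨-, rfl⟩ <;> simp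

lemma type_display_ne (v : String) : decide (get_type_display v ≠ "") = decide (v ≠ "") := by
  by_cases h : v = ""
  · subst h; decide
  · simp [gtd_ne v h, h]
lemma blank_ne (v : String) : decide (blank_if_zero v ≠ "") = pvNonblank v := by
  unfold blank_if_zero pvNonblank
  split_ifs with h
  · rcases h with h | h <;> simp [h]
  · push_neg at h
    simp [h.1, h.2]

lemma hit_eq (r : List (String × String)) (f : Sum String (String × String)) :
    pvRowHits r f = decide (pvVal r f ≠ "") := by
  cases f with
  | inr p => rw [pvRowHits, pvVal, merge_ne]
  | inl s =>
      rw [pvRowHits, pvVal]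
      by_cases h : s = "type"
      · simp only [h, if_true, type_display_ne]
      · simp only [h, if_false, blank_ne]

lemma found_eq (f : Sum String (String × String)) (rows : List (List (String × String))) :
    pvFoundA f rows = rows.any (fun r => pvVal r f ≠ "") := by
  induction rows with
  | nil => rfl
  | cons r rs ih => by_cases h : pvVal r f ≠ "" <;> simp [pvFoundA, h, ih]

lemma foldl_append_if_fst {α : Type} (c : Int × α → Bool) (l : List (Int × α)) (acc : List Int) :
    l.foldl (fun active p => if c p then active ++ [p.1] else active) acc
      = acc ++ (l.filter c).map (·.1) := by
  induction l generalizing acc with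
  | nil => simp
  | cons x xs ih => by_cases h : c x <;> simp [h, ih]

lemma rowScanAux (r : List (String × String)) (pending : List Nat) (active : List Int)
    (still : List Nat) :
    pending.foldl
      (fun acc idx =>
        if pvRowHits r (pvFieldsList.getD idx (.inl "")) then (acc.1 ++ [(idx : Int)], acc.2)
        else (acc.1, acc.2 ++ [idx]))
      (active, still)
      = (active ++ (pending.filter (fun i => pvHitRow r i)).map (fun (i : Nat) => (i : Int)),
         still ++ pending.filter (fun i => !pvHitRow r i)) := by
  induction pending generalizing active still with
  | nil => simp
  | cons i ps ih =>
      by_cases h : pvHitRow r i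
      · have h' : pvRowHits r (pvFieldsList.getD i (.inl "")) = true := by
          simpa [pvHitRow] using h
        simp only [List.foldl_cons, if_pos h']
        rw [ih, List.filter_cons_of_pos (by simpa using h),
            List.filter_cons_of_neg (by simpa using h)]
        simp
      · have h' : ¬ pvRowHits r (pvFieldsList.getD i (.inl "")) = true := by
          simpa [pvHitRow] using h
        simp only [List.foldl_cons, if_neg h']
        rw [ih, List.filter_cons_of_neg (by simpa using h),
            List.filter_cons_of_pos (by simpa using h)]
        simp

lemma rowScan_eq (r : List (String × String)) (pending : List Nat) (active : List Int) :
    pvRowScan r pending active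
      = (active ++ (pending.filter (fun i => pvHitRow r i)).map (fun (i : Nat) => (i : Int)),
         pending.filter (fun i => !pvHitRow r i)) := by
  unfold pvRowScan
  rw [rowScanAux]
  simp

lemma filter_split_perm {α : Type} (p q : α → Bool) (xs : List α) :
    (xs.filter p ++ (xs.filter (fun x => !p x)).filter q).Perm
      (xs.filter (fun x => p x || q x)) := by
  induction xs with
  | nil => simp
  | cons x xs ih =>
      by_cases hp : p x
      · simpa [List.filter_cons, hp] using ih.cons x
      · by_cases hq : q x
        · simp only [List.filter_cons, hp, hq, Bool.not_false, Bool.false_or, if_true]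
          exact (List.perm_middle).trans (ih.cons x)
        · simpa [List.filter_cons, hp, hq] using ih

lemma bLoop_eq (rows : List (List (String × String))) :
    ∀ (pending : List Nat) (active : List Int),
      pvBLoop rows pending active
        = PySem.List.sorted
            (active ++ (pending.filter (fun i => rows.any (fun r => pvHitRow r i))).map
              (fun (i : Nat) => (i : Int)))
            (fun x => x) := by
  induction rows with
  | nil => intro pending active; simp [pvBLoop]
  | cons r rs ih =>
      intro pending active
      by_cases hp : pending = []
      · simp [pvBLoop, hp]
      · rw [pvBLoop]
        simp only [hp, if_false]
        rw [rowScan_eq, ih]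
        simp only [List.any_cons]
        apply PySem.List.sorted_eq_sorted_of_perm _ _ _ (fun a b h => h)
        rw [List.append_assoc, ← List.map_append]
        exact List.Perm.append_left active
          ((filter_split_perm (fun i => pvHitRow r i)
            (fun i => rs.any (fun r' => pvHitRow r' i)) pending).map _)

lemma filtmap_congr {α β γ : Type} {l₁ : List α} {l₂ : List β}
    (c₁ : α → Bool) (c₂ : β → Bool) (f₁ : α → γ) (f₂ : β → γ)
    (h : List.Forall₂ (fun a b => c₁ a = c₂ b ∧ f₁ a = f₂ b) l₁ l₂) :
    (l₁.filter c₁).map f₁ = (l₂.filter c₂).map f₂ := by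
  induction h with
  | nil => rfl
  | cons hab _ ih =>
      rw [List.filter_cons, List.filter_cons, hab.1]
      cases hc : c₂ _ <;> simp [ih, hab.2]

lemma A_eq (data : List (List (String × String))) :
    get_active_columns data
      = (([0,1,2,3,4,5,6,7,8,9] : List Nat).filter
          (fun i => data.any (fun r => pvHitRow r i))).map (fun (i : Nat) => (i : Int)) := by
  rw [get_active_columns,
      foldl_append_if_fst (fun p => pvFoundA p.2 data) (PySem.List.enumerate pvFieldsList) [],
      List.nil_append]
  refine filtmap_congr _ _ _ _ ?_
  show List.Forall₂ _
    ([(0, Sum.inl "name"), (1, Sum.inl "type"), (2, Sum.inr ("mindam","maxdam")),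
      (3, Sum.inr ("minac","maxac")), (4, Sum.inl "reqstr"), (5, Sum.inl "reqdex"),
      (6, Sum.inl "block"), (7, Sum.inl "durability"), (8, Sum.inl "levelreq"),
      (9, Sum.inl "gemsockets")] : List (Int × Sum String (String × String))) _
  repeat' refine List.Forall₂.cons ⟨by rw [found_eq]; simp only [pvHitRow, hit_eq]; rfl, rfl⟩ ?_
  exact List.Forall₂.nil

lemma sorted_A (data : List (List (String × String))) :
    PySem.List.sorted
      ((([0,1,2,3,4,5,6,7,8,9] : List Nat).filter
          (fun i => data.any (fun r => pvHitRow r i))).map (fun (i : Nat) => (i : Int)))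
      (fun x => x)
      = (([0,1,2,3,4,5,6,7,8,9] : List Nat).filter
          (fun i => data.any (fun r => pvHitRow r i))).map (fun (i : Nat) => (i : Int)) := by
  refine PySem.List.sorted_eq_of_perm_of_pairwise_lt _ _ _ (List.Perm.refl _) ?_
  exact List.Pairwise.map _ (fun a b h => by exact_mod_cast h)
    (List.Pairwise.filter _ (by decide))

-- ===== VERDICT =====
theorem get_active_columns_spec : Claim_equal_get_active_columns := by
  intro data _
  show get_active_columns data = get_active_columns_alt data
  rw [get_active_columns_alt, show List.range pvFieldsList.length
        = ([0,1,2,3,4,5,6,7,8,9] : List Nat) from rfl,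
      bLoop_eq, List.nil_append, A_eq, sorted_A]
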